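-- pv_equiv track=rewrite | github.com/lwy0ever/hackerrank | Play with words.py | playWithWords
-- ===== SOURCE A (Python) =====
-- def playWithWords(s):
--     #
--     # Write your code here.
--     #
--     # dp[i][j]表示s[i:j + 1]中回文子序列的长度
--     # 状态初始条件:dp[i][i] = 1
--     # 状态转移方程:
--     # 如果str[i] == str[j],dp[i][j] = dp[i + 1][j - 1] + 2
--     # 如果str[i] != str[j],dp[i][j] = max(dp[i + 1][j],dp[i][j - 1])
--     # 外层循环j,从小到大
--     # 内层循环i,从大到小(从j - 1到0)
--     n = len(s)
--     dp = [[0] * n for _ in range(n)]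
--     for i in range(n):
--         dp[i][i] = 1
--     for j in range(1,n):
--         for i in range(j - 1,-1,-1):
--             if s[i] == s[j]:
--                 dp[i][j] = dp[i + 1][j - 1] + 2
--             else:
--                 dp[i][j] = max(dp[i + 1][j],dp[i][j - 1])
--     # 将s分成2部分,s[:m]和s2[m:],取dp[0][m - 1] * dp[m][n - 1]的最大值
--     ans = 0
--     for i in range(1,n - 1):
--         ans = max(ans,dp[0][i - 1] * dp[i][n - 1])
--     return ans
-- ===== SOURCE B (Python) =====
-- def playWithWords(s):
--     # Top-down: demand-driven memoized recursion on the LPS recurrence,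
--     # instead of A's bottom-up n-by-n table fill.
--     n = len(s)
--     memo = {}
--     def lps(i, j):
--         if i > j:
--             return 0
--         if i == j:
--             return 1
--         key = (i, j)
--         if key in memo:
--             return memo[key]
--         if s[i] == s[j]:
--             v = lps(i + 1, j - 1) + 2
--         else:
--             v = max(lps(i + 1, j), lps(i, j - 1))
--         memo[key] = v
--         return v
--     ans = 0
--     for i in range(1, n - 1):
--         ans = max(ans, lps(0, i - 1) * lps(i, n - 1))
--     return ans
-- ===== Notes on version B (the rewrite author's own statement) =====
-- stated objective: alternative
-- what changed: Replaces A's bottom-up n-by-n table fill with a top-down memoized recursive lps(i,j) over the same recurrence, computing only the demanded states; the split-combining loop stays.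
import Mathlib
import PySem

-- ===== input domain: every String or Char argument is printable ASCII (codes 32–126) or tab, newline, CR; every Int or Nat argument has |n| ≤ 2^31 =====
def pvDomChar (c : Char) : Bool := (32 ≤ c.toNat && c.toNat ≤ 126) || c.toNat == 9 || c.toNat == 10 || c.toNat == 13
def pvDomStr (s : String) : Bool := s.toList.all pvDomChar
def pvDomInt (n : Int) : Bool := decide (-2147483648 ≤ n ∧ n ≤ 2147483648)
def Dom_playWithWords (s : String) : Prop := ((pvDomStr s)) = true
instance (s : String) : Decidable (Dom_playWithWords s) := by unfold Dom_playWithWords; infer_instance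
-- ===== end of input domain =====

-- B replaces A's bottom-up n×n table fill with a top-down memoized recursion on the same
-- LPS recurrence (demand-driven evaluation), a different decomposition of equal asymptotic cost.

-- ===== PORT A =====
-- literal transliteration of A: full n×n table, diagonal init, fill by column j ascending / i descending,
-- then the combining loop over splits 1..n-2.  (pySetD/pyGetD are exact: every index reached is in range.)
def playWithWords (s : String) : Int :=
  let cs := s.toList
  let n : Int := (cs.length : Int)
  let dp0 : List (List Int) :=
    (PySem.List.pyRange 0 n 1).map (fun _ => List.replicate cs.length (0 : Int))
  let dp1 := (PySem.List.pyRange 0 n 1).foldl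
    (fun dp i => PySem.List.pySetD dp i (PySem.List.pySetD (PySem.List.pyGetD dp i []) i 1)) dp0
  let dp2 := (PySem.List.pyRange 1 n 1).foldl (fun dp j =>
    (PySem.List.pyRange (j - 1) (-1) (-1)).foldl (fun dp i =>
      PySem.List.pySetD dp i (PySem.List.pySetD (PySem.List.pyGetD dp i []) j
        (if PySem.List.pyGet? cs i == PySem.List.pyGet? cs j then
          PySem.List.pyGetD (PySem.List.pyGetD dp (i + 1) []) (j - 1) 0 + 2
        else
          max (PySem.List.pyGetD (PySem.List.pyGetD dp (i + 1) []) j 0)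
              (PySem.List.pyGetD (PySem.List.pyGetD dp i []) (j - 1) 0)))) dp) dp1
  (PySem.List.pyRange 1 (n - 1) 1).foldl (fun ans i =>
    max ans (PySem.List.pyGetD (PySem.List.pyGetD dp2 0 []) (i - 1) 0 *
             PySem.List.pyGetD (PySem.List.pyGetD dp2 i []) (n - 1) 0)) 0

-- ===== PORT B =====
-- literal transliteration of Source B's inner `lps`: the memo dict is threaded through the
-- recursion as state (r.1 = memo after the call, r.2 = the returned value).
def lpsB (cs : List Char) (memo : PySem.Dict (Int × Int) Int) (i j : Int) :
    PySem.Dict (Int × Int) Int × Int :=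
  if i > j then (memo, 0)
  else if i = j then (memo, 1)
  else
    match memo.get? (i, j) with
    | some v => (memo, v)
    | none =>
      if PySem.List.pyGet? cs i == PySem.List.pyGet? cs j then
        let r := lpsB cs memo (i + 1) (j - 1)
        (r.1.insert (i, j) (r.2 + 2), r.2 + 2)
      else
        let r1 := lpsB cs memo (i + 1) j
        let r2 := lpsB cs r1.1 i (j - 1)
        (r2.1.insert (i, j) (max r1.2 r2.2), max r1.2 r2.2)
termination_by (j + 1 - i).toNat
decreasing_by all_goals omega

-- Source B's combining loop, threading the memo through the two lps calls of each iteration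
def playWithWords_alt (s : String) : Int :=
  let cs := s.toList
  let n : Int := (cs.length : Int)
  ((PySem.List.pyRange 1 (n - 1) 1).foldl
    (fun (st : PySem.Dict (Int × Int) Int × Int) i =>
      let r1 := lpsB cs st.1 0 (i - 1)
      let r2 := lpsB cs r1.1 i (n - 1)
      (r2.1, max st.2 (r1.2 * r2.2)))
    (PySem.Dict.empty, 0)).2

-- ===== PRECONDITION & SPEC =====
def Spec_playWithWords (s : String) (out : Int) : Prop := out = playWithWords_alt s
instance (s : String) (out : Int) : Decidable (Spec_playWithWords s out) := by unfold Spec_playWithWords; infer_instance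

-- ===== CLAIM (what is proved, stated in full; the proofs are below) =====
def Claim_equal_playWithWords : Prop := ∀ (s : String), Dom_playWithWords s → Spec_playWithWords s (playWithWords s)

-- ===== LEMMAS AND PROOFS =====

def lps (cs : List Char) (i j : Nat) : Int :=
  if j < i then 0
  else if i = j then 1
  else if cs[i]? = cs[j]? then lps cs (i + 1) (j - 1) + 2
  else max (lps cs (i + 1) j) (lps cs i (j - 1))
termination_by j + 1 - i
decreasing_by all_goals omega

def tab (n : Nat) (f : Nat → Nat → Int) : List (List Int) :=
  (List.range n).map (fun i => (List.range n).map (f i))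

theorem tab_get {n : Nat} (f : Nat → Nat → Int) {i j : Nat} (hi : i < n) (hj : j < n) :
    ((tab n f).getD i []).getD j 0 = f i j := by
  simp [tab, List.getD_eq_getElem?_getD, hi, hj]

theorem tab_set {n : Nat} (f : Nat → Nat → Int) {i j : Nat} (v : Int) (hi : i < n) :
    (tab n f).set i (((tab n f).getD i []).set j v)
      = tab n (fun i' j' => if i' = i ∧ j' = j then v else f i' j') := by
  have hrow : (tab n f).getD i [] = (List.range n).map (f i) := by
    simp [tab, List.getD_eq_getElem?_getD, hi]
  rw [hrow]
  apply List.ext_getElem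
  · simp [tab]
  · intro k h1 h2
    simp only [tab, List.getElem_set, List.getElem_map, List.getElem_range] at *
    split_ifs with h
    · subst h
      apply List.ext_getElem
      · simp
      · intro m hm1 hm2
        have hm : m < n := by simpa using hm1
        simp only [List.getElem_set, List.getElem_map, List.getElem_range]
        by_cases hjm : j = m
        · subst hjm; simp
        · rw [if_neg hjm]; simp
          exact fun h => absurd h.symm hjm
    · have hk : k < n := by simpa [tab] using h1
      apply List.map_congr_left
      intro m hm
      have hki : ¬(k = i ∧ m = j) := by
        rintro ⟨hki, -⟩; exact h hki.symm
      simp only [eq_comm] at hki ⊢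
      rw [if_neg hki]

theorem tab_congr {n : Nat} {f g : Nat → Nat → Int}
    (h : ∀ i j, i < n → j < n → f i j = g i j) : tab n f = tab n g := by
  simp only [tab]
  apply List.map_congr_left
  intro i hi
  apply List.map_congr_left
  intro j hj
  exact h i j (List.mem_range.mp hi) (List.mem_range.mp hj)

def Ff (cs : List Char) (J I : Nat) : Nat → Nat → Int :=
  fun i j => if j < J ∨ j ≤ i ∨ (j = J ∧ I ≤ i) then lps cs i j else 0

def Gf (cs : List Char) (a : Nat) : Nat → Nat → Int :=
  fun i j => if j < a ∨ j ≤ i then lps cs i j else 0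

theorem lps_of_lt {cs : List Char} {i j : Nat} (h : j < i) : lps cs i j = 0 := by
  rw [lps]; simp [h]

theorem lps_self (cs : List Char) (i : Nat) : lps cs i i = 1 := by
  rw [lps]; simp

theorem lps_step {cs : List Char} {i j : Nat} (h : i < j) :
    lps cs i j = if cs[i]? = cs[j]? then lps cs (i + 1) (j - 1) + 2
                 else max (lps cs (i + 1) j) (lps cs i (j - 1)) := by
  rw [lps, if_neg (by omega), if_neg (by omega)]

theorem stepA (cs : List Char) (J I : Nat) (hI : I < J) (hJ : J < cs.length) :
    (PySem.List.pySetD (tab cs.length (Ff cs J (I + 1))) (I : Int)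
      (PySem.List.pySetD (PySem.List.pyGetD (tab cs.length (Ff cs J (I + 1))) (I : Int) []) ((J : Int))
        (if PySem.List.pyGet? cs (I : Int) == PySem.List.pyGet? cs ((J : Int)) then
          PySem.List.pyGetD (PySem.List.pyGetD (tab cs.length (Ff cs J (I + 1))) ((I : Int) + 1) []) (((J : Int)) - 1) 0 + 2
        else
          max (PySem.List.pyGetD (PySem.List.pyGetD (tab cs.length (Ff cs J (I + 1))) ((I : Int) + 1) []) ((J : Int)) 0)
              (PySem.List.pyGetD (PySem.List.pyGetD (tab cs.length (Ff cs J (I + 1))) (I : Int) []) (((J : Int)) - 1) 0))))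
    = tab cs.length (Ff cs J I) := by
  have e1 : ((I : Int) + 1) = ((I + 1 : Nat) : Int) := by push_cast; ring
  have e2 : ((J : Int) - 1) = ((J - 1 : Nat) : Int) := by omega
  rw [e1, e2]
  simp only [PySem.List.pySetD_natCast, PySem.List.pyGetD_natCast, PySem.List.pyGet?_natCast, beq_iff_eq]
  rw [tab_get _ (by omega) (by omega), tab_get _ (by omega) (by omega), tab_get _ (by omega) (by omega)]
  have hv : (if cs[I]? = cs[J]? then Ff cs J (I + 1) (I + 1) (J - 1) + 2
             else max (Ff cs J (I + 1) (I + 1) J) (Ff cs J (I + 1) I (J - 1))) = lps cs I J := by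
    have f1 : Ff cs J (I + 1) (I + 1) (J - 1) = lps cs (I + 1) (J - 1) := by
      unfold Ff; rw [if_pos (Or.inl (by omega))]
    have f2 : Ff cs J (I + 1) (I + 1) J = lps cs (I + 1) J := by
      unfold Ff; rw [if_pos (Or.inr (Or.inr ⟨rfl, le_refl _⟩))]
    have f3 : Ff cs J (I + 1) I (J - 1) = lps cs I (J - 1) := by
      unfold Ff; rw [if_pos (Or.inl (by omega))]
    rw [f1, f2, f3, ← lps_step hI]
  rw [hv, tab_set _ _ (by omega)]
  apply tab_congr
  intro i' j' hi' hj'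
  by_cases h : i' = I ∧ j' = J
  · obtain ⟨rfl, rfl⟩ := h
    rw [if_pos ⟨rfl, rfl⟩]
    unfold Ff; rw [if_pos (Or.inr (Or.inr ⟨rfl, le_refl _⟩))]
  · rw [if_neg h]
    unfold Ff
    split_ifs with h1 h2 <;> try rfl
    · exact absurd ⟨by omega, by omega⟩ h
    · omega

theorem innerA (cs : List Char) (J : Nat) (hJ : J < cs.length) :
    ∀ I, I ≤ J →
    (PySem.List.pyRange ((I : Int) - 1) (-1) (-1)).foldl (fun dp i =>
      PySem.List.pySetD dp i (PySem.List.pySetD (PySem.List.pyGetD dp i []) ((J : Int))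
        (if PySem.List.pyGet? cs i == PySem.List.pyGet? cs ((J : Int)) then
          PySem.List.pyGetD (PySem.List.pyGetD dp (i + 1) []) (((J : Int)) - 1) 0 + 2
        else
          max (PySem.List.pyGetD (PySem.List.pyGetD dp (i + 1) []) ((J : Int)) 0)
              (PySem.List.pyGetD (PySem.List.pyGetD dp i []) (((J : Int)) - 1) 0))))
      (tab cs.length (Ff cs J I))
    = tab cs.length (Ff cs J 0) := by
  intro I
  induction I with
  | zero =>
    intro _
    rw [show ((0 : Nat) : Int) - 1 = -1 by ring, PySem.List.pyRange_neg_one_eq_nil (by omega)]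
    rfl
  | succ I ih =>
    intro hIJ
    rw [show ((I + 1 : Nat) : Int) - 1 = (I : Int) by push_cast; ring,
        PySem.List.pyRange_neg_one_cons (by omega : (-1 : Int) < (I : Int)), List.foldl_cons]
    have := stepA cs J I (by omega) hJ
    rw [this]
    exact ih (by omega)

theorem outerA (cs : List Char) :
    ∀ m J, 1 ≤ J → cs.length ≤ J + m →
    (PySem.List.pyRange (J : Int) (cs.length : Int) 1).foldl (fun dp j =>
      (PySem.List.pyRange (j - 1) (-1) (-1)).foldl (fun dp i =>
        PySem.List.pySetD dp i (PySem.List.pySetD (PySem.List.pyGetD dp i []) j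
          (if PySem.List.pyGet? cs i == PySem.List.pyGet? cs j then
            PySem.List.pyGetD (PySem.List.pyGetD dp (i + 1) []) (j - 1) 0 + 2
          else
            max (PySem.List.pyGetD (PySem.List.pyGetD dp (i + 1) []) j 0)
                (PySem.List.pyGetD (PySem.List.pyGetD dp i []) (j - 1) 0)))) dp)
      (tab cs.length (Gf cs J))
    = tab cs.length (fun i j => lps cs i j) := by
  intro m
  induction m with
  | zero =>
    intro J h1 h2
    rw [PySem.List.pyRange_one_eq_nil (by exact_mod_cast h2 : (cs.length : Int) ≤ (J : Int))]
    exact tab_congr (fun i j hi hj => by unfold Gf; rw [if_pos (Or.inl (by omega))])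
  | succ m ih =>
    intro J h1 h2
    by_cases hn : cs.length ≤ J
    · rw [PySem.List.pyRange_one_eq_nil (by exact_mod_cast hn)]
      exact tab_congr (fun i j hi hj => by unfold Gf; rw [if_pos (Or.inl (by omega))])
    · push Not at hn
      rw [PySem.List.pyRange_one_cons (by exact_mod_cast hn), List.foldl_cons]
      have hGF : tab cs.length (Gf cs J) = tab cs.length (Ff cs J J) := by
        apply tab_congr; intro i j hi hj; unfold Gf Ff
        split_ifs with c1 c2 <;> first | rfl | omega
      rw [hGF, innerA cs J hn J (le_refl J)]
      have hF0 : tab cs.length (Ff cs J 0) = tab cs.length (Gf cs (J + 1)) := by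
        apply tab_congr; intro i j hi hj; unfold Gf Ff
        split_ifs with c1 c2 <;> first | rfl | omega
      rw [hF0, show ((J : Int) + 1) = ((J + 1 : Nat) : Int) by push_cast; ring]
      exact ih (J + 1) (by omega) (by omega)

def Df (a : Nat) : Nat → Nat → Int := fun i j => if i = j ∧ i < a then 1 else 0

theorem stage0A (cs : List Char) :
    (PySem.List.pyRange 0 (cs.length : Int) 1).map (fun _ => List.replicate cs.length (0 : Int))
      = tab cs.length (Df 0) := by
  have hD : Df 0 = fun _ _ => (0 : Int) := by funext i j; unfold Df; simp
  simp [tab, hD, PySem.List.pyRange_one, List.map_map, List.map_const', Function.comp_def]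

theorem diagA (cs : List Char) :
    ∀ m a, cs.length ≤ a + m →
    (PySem.List.pyRange (a : Int) (cs.length : Int) 1).foldl
      (fun dp i => PySem.List.pySetD dp i (PySem.List.pySetD (PySem.List.pyGetD dp i []) i 1))
      (tab cs.length (Df a))
    = tab cs.length (Df cs.length) := by
  intro m
  induction m with
  | zero =>
    intro a h
    rw [PySem.List.pyRange_one_eq_nil (by exact_mod_cast h)]
    exact tab_congr (fun i j hi hj => by unfold Df; split_ifs <;> first | rfl | omega)
  | succ m ih =>
    intro a h
    by_cases hn : cs.length ≤ a
    · rw [PySem.List.pyRange_one_eq_nil (by exact_mod_cast hn)]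
      exact tab_congr (fun i j hi hj => by unfold Df; split_ifs <;> first | rfl | omega)
    · push Not at hn
      rw [PySem.List.pyRange_one_cons (by exact_mod_cast hn), List.foldl_cons]
      simp only [PySem.List.pySetD_natCast, PySem.List.pyGetD_natCast]
      rw [tab_set _ _ hn]
      have : tab cs.length (fun i' j' => if i' = a ∧ j' = a then 1 else Df a i' j')
           = tab cs.length (Df (a + 1)) := by
        apply tab_congr; intro i j hi hj; unfold Df
        split_ifs <;> first | rfl | omega
      rw [this, show ((a : Int) + 1) = ((a + 1 : Nat) : Int) by push_cast; ring]
      exact ih (a + 1) (by omega)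

theorem DfGf (cs : List Char) : tab cs.length (Df cs.length) = tab cs.length (Gf cs 1) := by
  apply tab_congr; intro i j hi hj; unfold Df Gf
  by_cases hij : i = j
  · subst hij
    rw [if_pos ⟨rfl, hi⟩, if_pos (Or.inr (le_refl _)), lps_self]
  · rw [if_neg (by tauto)]
    split_ifs with c
    · rw [lps_of_lt (by omega)]
    · rfl

def combineSpec (cs : List Char) : Int :=
  (PySem.List.pyRange 1 ((cs.length : Int) - 1) 1).foldl
    (fun ans i => max ans (lps cs 0 (i.toNat - 1) * lps cs i.toNat (cs.length - 1))) 0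

theorem combineA (cs : List Char) :
    (PySem.List.pyRange 1 ((cs.length : Int) - 1) 1).foldl (fun ans i =>
      max ans (PySem.List.pyGetD (PySem.List.pyGetD (tab cs.length (fun i j => lps cs i j)) 0 []) (i - 1) 0 *
               PySem.List.pyGetD (PySem.List.pyGetD (tab cs.length (fun i j => lps cs i j)) i []) ((cs.length : Int) - 1) 0)) 0
    = combineSpec cs := by
  unfold combineSpec
  apply PySem.List.foldl_congr_mem
  intro ans i hm
  rw [PySem.List.mem_pyRange_one] at hm
  have h3 : 3 ≤ cs.length := by omega
  have ei : i = ((i.toNat : Nat) : Int) := by omega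
  have e1 : i - 1 = ((i.toNat - 1 : Nat) : Int) := by omega
  have e2 : ((cs.length : Int) - 1) = ((cs.length - 1 : Nat) : Int) := by omega
  rw [e1, e2, ei]
  simp only [PySem.List.pyGetD_natCast]
  rw [show (0 : Int) = ((0 : Nat) : Int) from rfl]
  simp only [PySem.List.pyGetD_natCast]
  simp only [Nat.cast_zero, Int.toNat_natCast]
  rw [tab_get _ (by omega) (by omega), tab_get _ (by omega) (by omega)]

theorem diagA0 (cs : List Char) :
    (PySem.List.pyRange 0 (cs.length : Int) 1).foldl
      (fun dp i => PySem.List.pySetD dp i (PySem.List.pySetD (PySem.List.pyGetD dp i []) i 1))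
      (tab cs.length (Df 0))
    = tab cs.length (Df cs.length) := by
  have := diagA cs cs.length 0 (by omega)
  simpa using this

theorem outerA1 (cs : List Char) :
    (PySem.List.pyRange 1 (cs.length : Int) 1).foldl (fun dp j =>
      (PySem.List.pyRange (j - 1) (-1) (-1)).foldl (fun dp i =>
        PySem.List.pySetD dp i (PySem.List.pySetD (PySem.List.pyGetD dp i []) j
          (if PySem.List.pyGet? cs i == PySem.List.pyGet? cs j then
            PySem.List.pyGetD (PySem.List.pyGetD dp (i + 1) []) (j - 1) 0 + 2
          else
            max (PySem.List.pyGetD (PySem.List.pyGetD dp (i + 1) []) j 0)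
                (PySem.List.pyGetD (PySem.List.pyGetD dp i []) (j - 1) 0)))) dp)
      (tab cs.length (Gf cs 1))
    = tab cs.length (fun i j => lps cs i j) := by
  have := outerA cs cs.length 1 (le_refl _) (by omega)
  simpa using this

theorem portA_eq (s : String) : playWithWords s = combineSpec s.toList := by
  unfold playWithWords
  simp only []
  rw [stage0A s.toList, diagA0 s.toList, DfGf s.toList, outerA1 s.toList, combineA s.toList]

-- ----- B side: the memoized recursion computes the pure recurrence lpsI -----

def lpsI (cs : List Char) (i j : Int) : Int :=
  if i > j then 0
  else if i = j then 1
  else if PySem.List.pyGet? cs i == PySem.List.pyGet? cs j then lpsI cs (i + 1) (j - 1) + 2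
  else max (lpsI cs (i + 1) j) (lpsI cs i (j - 1))
termination_by (j + 1 - i).toNat
decreasing_by all_goals omega

def GoodM (cs : List Char) (m : PySem.Dict (Int × Int) Int) : Prop :=
  ∀ i j v, m.get? (i, j) = some v → v = lpsI cs i j

theorem lpsI_step {cs : List Char} {i j : Int} (h1 : ¬ i > j) (h2 : ¬ i = j) :
    lpsI cs i j =
      if PySem.List.pyGet? cs i == PySem.List.pyGet? cs j then lpsI cs (i + 1) (j - 1) + 2
      else max (lpsI cs (i + 1) j) (lpsI cs i (j - 1)) := by
  rw [lpsI, if_neg h1, if_neg h2]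

theorem GoodM_insert {cs : List Char} {m : PySem.Dict (Int × Int) Int} {i j : Int} {v : Int}
    (hg : GoodM cs m) (hv : v = lpsI cs i j) : GoodM cs (m.insert (i, j) v) := by
  intro i' j' w hw
  rw [PySem.Dict.get?_insert] at hw
  split_ifs at hw with h
  · obtain ⟨rfl, rfl⟩ := Prod.mk.injEq .. ▸ Prod.ext_iff.mp h
    cases hw; exact hv
  · exact hg i' j' w hw

theorem GoodM_empty (cs : List Char) : GoodM cs PySem.Dict.empty := by
  intro i j v hv
  rw [PySem.Dict.get?_empty] at hv
  cases hv

theorem lpsB_good (cs : List Char) :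
    ∀ (n : Nat) (i j : Int) (m : PySem.Dict (Int × Int) Int), (j + 1 - i).toNat ≤ n →
      GoodM cs m → (lpsB cs m i j).2 = lpsI cs i j ∧ GoodM cs (lpsB cs m i j).1 := by
  intro n
  induction n with
  | zero =>
    intro i j m hn hg
    have h1 : i > j := by omega
    rw [lpsB, if_pos h1]
    exact ⟨by rw [lpsI, if_pos h1], hg⟩
  | succ n ih =>
    intro i j m hn hg
    rw [lpsB]
    by_cases h1 : i > j
    · rw [if_pos h1]
      exact ⟨by rw [lpsI, if_pos h1], hg⟩
    · rw [if_neg h1]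
      by_cases h2 : i = j
      · rw [if_pos h2]
        exact ⟨by rw [lpsI, if_neg h1, if_pos h2], hg⟩
      · rw [if_neg h2]
        cases hget : m.get? (i, j) with
        | some v =>
          exact ⟨hg i j v hget, hg⟩
        | none =>
          by_cases h3 : (PySem.List.pyGet? cs i == PySem.List.pyGet? cs j) = true
          · simp only [if_pos h3]
            obtain ⟨ha, hm⟩ := ih (i + 1) (j - 1) m (by omega) hg
            constructor
            · rw [lpsI_step h1 h2, if_pos h3, ha]
            · exact GoodM_insert hm (by rw [lpsI_step h1 h2, if_pos h3, ha])
          · simp only [if_neg h3]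
            obtain ⟨ha1, hm1⟩ := ih (i + 1) j m (by omega) hg
            obtain ⟨ha2, hm2⟩ := ih i (j - 1) _ (by omega) hm1
            constructor
            · rw [lpsI_step h1 h2, if_neg h3, ha1, ha2]
            · exact GoodM_insert hm2 (by rw [lpsI_step h1 h2, if_neg h3, ha1, ha2])

theorem lpsB_spec (cs : List Char) (m : PySem.Dict (Int × Int) Int) (i j : Int)
    (hg : GoodM cs m) : (lpsB cs m i j).2 = lpsI cs i j ∧ GoodM cs (lpsB cs m i j).1 :=
  lpsB_good cs ((j + 1 - i).toNat) i j m le_rfl hg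

theorem loopB (cs : List Char) (nn : Int) :
    ∀ (l : List Int) (m : PySem.Dict (Int × Int) Int) (ans : Int), GoodM cs m →
    (l.foldl (fun (st : PySem.Dict (Int × Int) Int × Int) i =>
        let r1 := lpsB cs st.1 0 (i - 1)
        let r2 := lpsB cs r1.1 i (nn - 1)
        (r2.1, max st.2 (r1.2 * r2.2))) (m, ans)).2
      = l.foldl (fun a i => max a (lpsI cs 0 (i - 1) * lpsI cs i (nn - 1))) ans := by
  intro l
  induction l with
  | nil => intro m ans _; rfl
  | cons x l ih =>
    intro m ans hg
    obtain ⟨ha1, hm1⟩ := lpsB_spec cs m 0 (x - 1) hg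
    obtain ⟨ha2, hm2⟩ := lpsB_spec cs (lpsB cs m 0 (x - 1)).1 x (nn - 1) hm1
    simp only [List.foldl_cons]
    rw [ih _ _ hm2, ha1, ha2]

theorem lpsI_eq_lps (cs : List Char) :
    ∀ (n : Nat) (i j : Nat), j + 1 - i ≤ n → lpsI cs (i : Int) (j : Int) = lps cs i j := by
  intro n
  induction n with
  | zero =>
    intro i j hn
    have h : (i : Int) > (j : Int) := by omega
    rw [lpsI, if_pos h, lps_of_lt (by omega)]
  | succ n ih =>
    intro i j hn
    by_cases h1 : j < i
    · rw [lpsI, if_pos (by omega : (i : Int) > (j : Int)), lps_of_lt h1]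
    · by_cases h2 : i = j
      · subst h2
        rw [lpsI, if_neg (by omega), if_pos rfl, lps_self]
      · have hij : i < j := by omega
        rw [lpsI_step (by omega) (by omega), lps_step hij]
        simp only [PySem.List.pyGet?_natCast, beq_iff_eq]
        rw [show ((i : Int) + 1) = ((i + 1 : Nat) : Int) by push_cast; ring,
            show ((j : Int) - 1) = ((j - 1 : Nat) : Int) by omega]
        rw [ih (i + 1) (j - 1) (by omega), ih (i + 1) j (by omega), ih i (j - 1) (by omega)]

theorem combineB (cs : List Char) :
    (PySem.List.pyRange 1 ((cs.length : Int) - 1) 1).foldl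
      (fun a i => max a (lpsI cs 0 (i - 1) * lpsI cs i ((cs.length : Int) - 1))) 0
    = combineSpec cs := by
  unfold combineSpec
  apply PySem.List.foldl_congr_mem
  intro ans i hm
  rw [PySem.List.mem_pyRange_one] at hm
  have ei : i = ((i.toNat : Nat) : Int) := by omega
  have e2 : ((cs.length : Int) - 1) = ((cs.length - 1 : Nat) : Int) := by omega
  rw [ei, e2]
  simp only [Int.toNat_natCast]
  rw [show ((i.toNat : Int) - 1) = ((i.toNat - 1 : Nat) : Int) by omega,
      show (0 : Int) = ((0 : Nat) : Int) from rfl,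
      lpsI_eq_lps cs (i.toNat - 1 + 1) 0 (i.toNat - 1) le_rfl,
      lpsI_eq_lps cs (cs.length - 1 + 1 - i.toNat) i.toNat (cs.length - 1) le_rfl]

theorem portB_eq (s : String) : playWithWords_alt s = combineSpec s.toList := by
  unfold playWithWords_alt
  simp only []
  rw [loopB s.toList (s.toList.length : Int) _ PySem.Dict.empty 0 (GoodM_empty s.toList)]
  exact combineB s.toList

-- ===== VERDICT (by name: the statement is the Claim_ definition above) =====
theorem playWithWords_spec : Claim_equal_playWithWords := by
  intro s _
  unfold Spec_playWithWords
  rw [portA_eq, portB_eq]
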